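-- pv_equiv track=rewrite | github.com/awellisz/BS-Poker | main.py | fiveok
-- ===== SOURCE A (Python) =====
-- from collections import Counter
--
-- def contains_all(a, b):
--     """
--     Utility function
--     Check if array A contains all elements of B, including with repeated values.
--     E.g. containsall([11, 4, 6], [4, 4]) -> False
--     E.g. containsall([11, 4, 6], [6, 11]) -> True
--     """
--     counter_a = Counter(a)
--     counter_b = Counter(b)
--     return all(v <= counter_a[k] for k, v in counter_b.items())
--
-- def fiveok(hand, c):
--     """
--     Return true if five of a kind
--     """
--     if (len(hand) < 5):
--         return False
--
--     matches = [[c, c, c, c, 2], [c, c, c, 2, 2], [c, c, 2, 2, 2], [c, 2, 2, 2, 2]]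
--     for match in matches:
--         if contains_all(hand, match):
--             return True
--     return False
-- ===== SOURCE B (Python) =====
-- def fiveok(hand, c):
--     if len(hand) < 5:
--         return False
--     n2 = hand.count(2)
--     if c == 2:
--         return n2 >= 5
--     nc = hand.count(c)
--     return nc >= 1 and n2 >= 5 - min(nc, 4)
-- ===== Notes on version B (the rewrite author's own statement) =====
-- stated objective: simpler
-- what changed: Instead of building Counters and testing containment of four candidate multisets, B counts hand.count(c) and hand.count(2) once and decides five-of-a-kind by the single inequality n2 >= 5 - min(nc, 4) (collapsing to n2 >= 5 when c == 2).
import Mathlib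
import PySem

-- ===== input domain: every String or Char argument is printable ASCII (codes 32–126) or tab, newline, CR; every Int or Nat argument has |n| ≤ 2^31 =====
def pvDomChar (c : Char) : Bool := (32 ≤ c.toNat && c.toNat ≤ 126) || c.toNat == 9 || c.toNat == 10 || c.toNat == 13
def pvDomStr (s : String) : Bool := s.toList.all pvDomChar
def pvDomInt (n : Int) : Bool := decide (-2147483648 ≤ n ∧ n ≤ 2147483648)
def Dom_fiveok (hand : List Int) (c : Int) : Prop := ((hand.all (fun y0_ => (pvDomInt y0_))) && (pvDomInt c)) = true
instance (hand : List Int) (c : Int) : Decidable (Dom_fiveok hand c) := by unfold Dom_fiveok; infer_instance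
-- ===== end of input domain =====

-- B replaces A's four Counter-containment scans with two hand.count calls and one count inequality; objective: simpler.

-- ===== PORT A =====
-- contains_all(a, b): build Counter of each list, check every multiplicity of b is covered by a
-- (Counter[k] on a missing key is 0, hence getD … 0).
def contains_all (a b : List Int) : Bool :=
  (PySem.Dict.counter b).items.all (fun kv => decide (kv.2 ≤ (PySem.Dict.counter a).getD kv.1 0))

def fiveok (hand : List Int) (c : Int) : Bool :=
  if hand.length < 5 then false
  else
    let matchList : List (List Int) :=
      [[c, c, c, c, 2], [c, c, c, 2, 2], [c, c, 2, 2, 2], [c, 2, 2, 2, 2]]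
    matchList.any (fun m => contains_all hand m)

-- ===== PORT B =====
def fiveok_alt (hand : List Int) (c : Int) : Bool :=
  if hand.length < 5 then false
  else
    let n2 : Int := PySem.List.count hand 2
    if c == 2 then decide (5 ≤ n2)
    else
      let nc : Int := PySem.List.count hand c
      decide (1 ≤ nc) && decide (5 - min nc 4 ≤ n2)

-- ===== PRECONDITION & SPEC =====
def Spec_fiveok (hand : List Int) (c : Int) (out : Bool) : Prop := out = fiveok_alt hand c
instance (hand : List Int) (c : Int) (out : Bool) : Decidable (Spec_fiveok hand c out) := by unfold Spec_fiveok; infer_instance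

-- ===== CLAIM (what is proved, stated in full; the proofs are below) =====
def Claim_equal_fiveok : Prop := ∀ (hand : List Int) (c : Int), Dom_fiveok hand c → Spec_fiveok hand c (fiveok hand c)

-- ===== LEMMAS AND PROOFS =====

-- A's contains_all is exactly a per-member count comparison.
theorem contains_all_iff (a b : List Int) :
    contains_all a b = decide (∀ k ∈ b, b.count k ≤ a.count k) := by
  rw [Bool.eq_iff_iff]
  simp [contains_all, PySem.Dict.items_counter, PySem.Dict.getD_counter,
        PySem.Set.mem_ofList]

-- ===== VERDICT (by name: the statement is the Claim_ definition above) =====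
theorem fiveok_spec : Claim_equal_fiveok := by
  intro hand c _
  unfold Spec_fiveok fiveok fiveok_alt
  by_cases hlen : hand.length < 5
  · simp [hlen]
  · by_cases hc : c = 2
    · subst hc
      simp [hlen, contains_all_iff, List.count_cons]
    · have h2c : ¬((2 : Int) = c) := fun h => hc h.symm
      simp [hlen, contains_all_iff, List.count_cons, hc, h2c, PySem.List.count_eq]
      simp only [← List.count_pos_iff]
      rw [Bool.eq_iff_iff]
      simp only [Bool.or_eq_true, Bool.and_eq_true, decide_eq_true_eq]
      omega
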